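-- pv_equiv track=rewrite | github.com/childsish/sofia | sofia_/entity_definition_parser.py | parse_entity_definition
-- ===== SOURCE A (Python) =====
-- from collections import namedtuple
--
-- EntityDefinition = namedtuple('EntityDefinition', ('type', 'alias', 'attributes'))
--
-- def parse_entity_definition(definition):
--     """ A parser for resources on the command line and from resource files.
--
--     The resource string takes the form of:
--         <provided_resource> ::= <type_or_filename>[:<name>][:<attribute>[:<attribute>]*]
--         <attribute> ::= <key>=<value>[,<value>]*
--     where
--         type_or_filename
--             is the entity type or the file name of a resource
--         <name>
--             is the name of the entity
--         <key>
--             is the name of an attribute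
--         <value>
--             is the value of an attribute
--
--     An example:
--         -r /tmp/tmp.vcf
--         -r "/tmp/tmp.vcf:tmp:entity=vcf"
--         -r "tmp.vcf:tmp:format=vcf:x=x:y=y:chromosome_id=ucsc"
--
--     :param definition: string defining an entity
--     :return: EntityDefinition with the variable part, name and attributes
--     """
--     parts = definition.split(':')
--     type = parts[0]
--     alias = None
--     attributes = {}
--     for part in parts[1:]:
--         if '=' in part:
--             key, value = part.split('=', 1)
--             attributes[key] = value
--         elif alias is None:
--             alias = part
--         else:
--             raise ValueError('entity name already defined')
--     return EntityDefinition(type, alias, attributes)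
-- ===== SOURCE B (Python) =====
-- from collections import namedtuple
--
-- EntityDefinition = namedtuple('EntityDefinition', ('type', 'alias', 'attributes'))
--
-- def parse_entity_definition(definition):
--     parts = definition.split(':')
--     attributes = {p.split('=', 1)[0]: p.split('=', 1)[1] for p in parts[1:] if '=' in p}
--     bare = [p for p in parts[1:] if '=' not in p]
--     if len(bare) > 1:
--         raise ValueError('entity name already defined')
--     alias = bare[0] if bare else None
--     return EntityDefinition(parts[0], alias, attributes)
-- ===== Notes on version B (the rewrite author's own statement) =====
-- stated objective: simpler
-- what changed: Replaces A's single stateful loop (mutable alias variable plus dict) with two declarative filtering passes: a dict comprehension over the parts that carry an equals sign and a separate list of the bare parts from which the alias is read (raising the same ValueError when there are two or more bare parts).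
import Mathlib
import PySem

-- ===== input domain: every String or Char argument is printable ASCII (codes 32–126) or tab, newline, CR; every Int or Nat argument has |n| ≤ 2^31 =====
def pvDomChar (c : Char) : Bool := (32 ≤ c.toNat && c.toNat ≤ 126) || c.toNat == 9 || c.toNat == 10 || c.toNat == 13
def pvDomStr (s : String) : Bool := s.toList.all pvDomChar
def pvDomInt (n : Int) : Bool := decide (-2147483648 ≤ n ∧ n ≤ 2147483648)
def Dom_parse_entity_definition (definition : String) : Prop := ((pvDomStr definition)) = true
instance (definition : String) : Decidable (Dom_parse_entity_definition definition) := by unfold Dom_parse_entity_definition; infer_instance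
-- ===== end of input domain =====

-- B replaces A's single stateful loop by two filtering passes: a dict built from the parts carrying an equals sign
-- and the bare parts collected separately (alias = the single bare part, if any); objective: simpler.


-- ===== PORT A =====
-- A's loop over parts[1:]; `none` models the ValueError raise.
-- When the separator occurs in part, part.split with maxsplit 1 has exactly two pieces, so the `| _ =>` unpacking
-- fallbacks below (in both ports) are unreachable.
def pvALoop : List String → Option String → PySem.Dict String String → Option (Option String × PySem.Dict String String)
  | [], al, attrs => some (al, attrs)
  | part :: rest, al, attrs =>
    if PySem.Str.isIn "=" part then
      match PySem.Str.splitMax? part "=" 1 with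
      | some (key :: value :: _) => pvALoop rest al (attrs.insert key value)
      | _ => pvALoop rest al attrs
    else
      match al with
      | none => pvALoop rest (some part) attrs
      | some _ => none

def parse_entity_definition (definition : String) : String × Option String × (List (String × String)) :=
  let parts := (PySem.Str.split? definition ":").getD []   -- sep ":" ≠ "", so split? is `some`
  match pvALoop parts.tail none PySem.Dict.empty with
  | some (al, attrs) => (PySem.List.pyGetD parts 0 "", al, attrs.items)
  | none => ("", none, [])   -- A raises ValueError here; excluded by Pre_

-- ===== PORT B =====
def parse_entity_definition_alt (definition : String) : String × Option String × (List (String × String)) :=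
  let parts := (PySem.Str.split? definition ":").getD []   -- sep ":" ≠ "", so split? is `some`
  let rest := parts.tail
  let attributes := (rest.filter (fun p => PySem.Str.isIn "=" p)).foldl
    (fun d p => match PySem.Str.splitMax? p "=" 1 with
      | some (key :: value :: _) => d.insert key value
      | _ => d) PySem.Dict.empty
  let bare := rest.filter (fun p => !(PySem.Str.isIn "=" p))
  match bare with
  | [] => (PySem.List.pyGetD parts 0 "", none, attributes.items)
  | [a] => (PySem.List.pyGetD parts 0 "", some a, attributes.items)
  | _ => ("", none, [])   -- B raises the same ValueError here; excluded by Pre_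

-- ===== PRECONDITION & SPEC =====
-- Pre_ excludes exactly the inputs with two or more bare parts (no equals sign) after the
-- first colon-separated part, on which A raises ValueError; B's own check raises the same ValueError there.
def Pre_parse_entity_definition (definition : String) : Prop :=
  (((PySem.Str.split? definition ":").getD []).tail.filter
    (fun p => !(PySem.Str.isIn "=" p))).length ≤ 1
instance (definition : String) : Decidable (Pre_parse_entity_definition definition) := by unfold Pre_parse_entity_definition; infer_instance

def pvWitness_parse_entity_definition : String := "tmp.vcf:tmp:format=vcf:x=x"

def Spec_parse_entity_definition (definition : String) (out : String × Option String × (List (String × String))) : Prop := out = parse_entity_definition_alt definition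
instance (definition : String) (out : String × Option String × (List (String × String))) : Decidable (Spec_parse_entity_definition definition out) := by unfold Spec_parse_entity_definition; infer_instance

-- ===== CLAIM (what is proved, stated in full; the proofs are below) =====
def Claim_equal_parse_entity_definition : Prop := ∀ (definition : String), Dom_parse_entity_definition definition → Pre_parse_entity_definition definition → Spec_parse_entity_definition definition (parse_entity_definition definition)

-- ===== LEMMAS AND PROOFS =====

-- A's loop, when it cannot hit the raise (at most one bare part given the current alias state),
-- returns the alias resolved first-bare-wins and the dict folded over the equals-sign parts — B's shape.
lemma pvALoop_eq (rest : List String) (al : Option String) (attrs : PySem.Dict String String)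
    (h : (rest.filter (fun p => !(PySem.Str.isIn "=" p))).length
          + (if al.isSome then 1 else 0) ≤ 1) :
    pvALoop rest al attrs =
      some (al.or (rest.filter (fun p => !(PySem.Str.isIn "=" p))).head?,
        (rest.filter (fun p => PySem.Str.isIn "=" p)).foldl
          (fun d p => match PySem.Str.splitMax? p "=" 1 with
            | some (key :: value :: _) => d.insert key value
            | _ => d) attrs) := by
  induction rest generalizing al attrs with
  | nil => cases al <;> simp [pvALoop]
  | cons part rest ih =>
    by_cases hp : PySem.Str.isIn "=" part
    · simp only [List.filter_cons, hp, Bool.not_true, if_false,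
        Bool.false_eq_true, if_true, List.foldl_cons] at h ⊢
      simp only [pvALoop, hp, if_true]
      cases hsp : PySem.Str.splitMax? part "=" 1 with
      | none => exact ih al attrs h
      | some l =>
        match l with
        | [] => exact ih al attrs h
        | [k] => exact ih al attrs h
        | k :: v :: t => exact ih al (attrs.insert k v) h
    · have hpc : PySem.Chars.isIn ['='] part.toList = false := by simpa using hp
      rw [Bool.not_eq_true] at hp
      cases al with
      | some a => simp [hpc] at h
      | none =>
        simp only [pvALoop, hp, Bool.false_eq_true, if_false]
        rw [ih (some part) attrs (by simp [hpc] at h ⊢; omega)]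
        simp [hpc]

-- ===== VERDICT (by name: the statement is the Claim_ definition above) =====
theorem parse_entity_definition_spec : Claim_equal_parse_entity_definition := by
  intro d _ hpre
  unfold Pre_parse_entity_definition at hpre
  unfold Spec_parse_entity_definition
  simp only [parse_entity_definition, parse_entity_definition_alt]
  rw [pvALoop_eq _ none PySem.Dict.empty (by simpa using hpre)]
  cases hb : (((PySem.Str.split? d ":").getD []).tail.filter (fun p => !(PySem.Str.isIn "=" p))) with
  | nil => simp
  | cons a t =>
    rw [hb] at hpre
    cases t with
    | nil => simp
    | cons b t' => simp at hpre
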